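-- pv_equiv track=rewrite | github.com/shokhai2007-arch/For_Stegno | logic.py | encode_text_zero_width
-- ===== SOURCE A (Python) =====
-- ZW_ZERO  = "\u200c"   # Zero-width non-joiner  → bit 0
--
-- ZW_ONE   = "\u200d"   # Zero-width joiner       → bit 1
--
-- ZW_START = "\u200b"   # Zero-width space        → delimiter (start / end)
--
-- ZW_SEP   = "\u2060"   # Word joiner             → byte separator (readability)
--
-- def _text_to_bits(text: str) -> str:
--     """Convert a UTF-8 string to a binary string (one char per bit)."""
--     encoded = text.encode("utf-8")
--     return "".join(f"{byte:08b}" for byte in encoded)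
--
-- def encode_text_zero_width(cover: str, secret: str) -> str:
--     """
--     Embed *secret* invisibly into *cover* text using zero-width characters.
--
--     The zero-width payload is inserted right after the first character of
--     the cover text so it cannot accidentally be stripped from the start/end.
--     """
--     if not cover:
--         raise ValueError("Cover text must not be empty.")
--     if not secret:
--         raise ValueError("Secret text must not be empty.")
--
--     bits = _text_to_bits(secret)
--
--     # Build the invisible payload
--     payload_chars = [ZW_START]
--     for i, bit in enumerate(bits):
--         payload_chars.append(ZW_ONE if bit == "1" else ZW_ZERO)
--         # Insert a visual separator every 8 bits (not visible; aids debugging)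
--         if (i + 1) % 8 == 0:
--             payload_chars.append(ZW_SEP)
--     payload_chars.append(ZW_START)
--
--     payload = "".join(payload_chars)
--
--     # Insert the payload after the first character
--     return cover[0] + payload + cover[1:]
-- ===== SOURCE B (Python) =====
-- ZW_ZERO  = "\u200c"   # bit 0
-- ZW_ONE   = "\u200d"   # bit 1
-- ZW_START = "\u200b"   # delimiter
-- ZW_SEP   = "\u2060"   # byte separator
--
-- def _zw_byte(n: int) -> str:
--     """Zero-width encoding of one byte, built back-to-front by divmod (LSB first)."""
--     out = ZW_SEP
--     for _ in range(8):
--         out = (ZW_ONE if n % 2 else ZW_ZERO) + out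
--         n //= 2
--     return out
--
-- # 256-entry lookup table, computed once at import time.
-- _ZW_BYTE = [_zw_byte(n) for n in range(256)]
--
-- def encode_text_zero_width(cover: str, secret: str) -> str:
--     if not cover:
--         raise ValueError("Cover text must not be empty.")
--     if not secret:
--         raise ValueError("Secret text must not be empty.")
--     payload = ZW_START + "".join(map(_ZW_BYTE.__getitem__, secret.encode("utf-8"))) + ZW_START
--     return cover[0] + payload + cover[1:]
-- ===== Notes on version B (the rewrite author's own statement) =====
-- stated objective: faster
-- what changed: B precomputes a 256-entry byte-to-zero-width-string table once (each entry built back-to-front by repeated divmod, LSB first, separator included), so encoding is a pure table-lookup join with no per-bit formatting, no enumerate and no mod-8 separator counter.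
import Mathlib
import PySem

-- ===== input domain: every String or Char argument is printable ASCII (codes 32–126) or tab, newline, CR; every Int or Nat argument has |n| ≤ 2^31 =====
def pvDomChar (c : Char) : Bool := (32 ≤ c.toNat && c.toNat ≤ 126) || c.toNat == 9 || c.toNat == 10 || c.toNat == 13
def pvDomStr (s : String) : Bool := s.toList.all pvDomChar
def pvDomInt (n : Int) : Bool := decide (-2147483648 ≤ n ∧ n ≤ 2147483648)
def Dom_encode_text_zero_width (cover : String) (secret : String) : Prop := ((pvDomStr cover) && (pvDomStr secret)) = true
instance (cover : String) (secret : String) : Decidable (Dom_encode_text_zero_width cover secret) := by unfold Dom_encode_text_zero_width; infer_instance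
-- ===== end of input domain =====

-- B replaces A's flat bit-string + (i+1)%8 separator loop by a 256-entry lookup table built once
-- by divmod back-to-front; behaviour is identical on Pre_.

-- Zero-width characters (shared module constants of both Pythons)
def zwZero : Char := '\u200C'
def zwOne : Char := '\u200D'
def zwStart : Char := '\u200B'
def zwSep : Char := '\u2060'

-- ===== PORT A =====
-- f"{byte:08b}" for a byte value < 256
def bits8 (n : Nat) : List Char :=
  [if n / 128 % 2 = 1 then '1' else '0',
   if n / 64 % 2 = 1 then '1' else '0',
   if n / 32 % 2 = 1 then '1' else '0',
   if n / 16 % 2 = 1 then '1' else '0',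
   if n / 8 % 2 = 1 then '1' else '0',
   if n / 4 % 2 = 1 then '1' else '0',
   if n / 2 % 2 = 1 then '1' else '0',
   if n % 2 = 1 then '1' else '0']

-- _text_to_bits: "".join(f"{byte:08b}" for byte in text.encode("utf-8"))
-- (exact on Dom: every char is ASCII, so its single UTF-8 byte is its code point)
def textToBits (text : String) : List Char :=
  text.toList.flatMap (fun c => bits8 c.toNat)

-- the `for i, bit in enumerate(bits)` loop appending to payload_chars
def aPayloadLoop : List Char → Nat → List Char → List Char
  | [], _, acc => acc
  | bit :: rest, i, acc =>
      aPayloadLoop rest (i + 1)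
        ((acc ++ [if bit = '1' then zwOne else zwZero]) ++
          (if (i + 1) % 8 = 0 then [zwSep] else []))

def encode_text_zero_width (cover : String) (secret : String) : String :=
  -- Python raises ValueError on empty cover/secret: excluded by Pre_; the match guard on
  -- empty cover only makes cover[0] total.
  let bits := textToBits secret
  let payloadChars := aPayloadLoop bits 0 [zwStart] ++ [zwStart]
  match cover.toList with
  | [] => ""
  | c :: rest => String.ofList ([c] ++ payloadChars ++ rest)

-- ===== PORT B =====
-- _zw_byte: one byte's zero-width string, built back-to-front by repeated divmod (LSB first)
def zwByteRec : Nat → Nat → List Char → List Char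
  | 0, _, out => out
  | k + 1, n, out => zwByteRec k (n / 2) ((if n % 2 = 1 then zwOne else zwZero) :: out)

-- _ZW_BYTE = [_zw_byte(n) for n in range(256)]  (computed once)
def zwByteTable : List String :=
  (List.range 256).map (fun n => String.ofList (zwByteRec 8 n [zwSep]))

def encode_text_zero_width_alt (cover : String) (secret : String) : String :=
  -- table lookup _ZW_BYTE[b] is always in range for a byte; getD "" only makes it total
  let payloadChars :=
    [zwStart] ++ secret.toList.flatMap (fun c => (zwByteTable.getD c.toNat "").toList) ++ [zwStart]
  match cover.toList with
  | [] => ""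
  | c :: rest => String.ofList ([c] ++ payloadChars ++ rest)

-- ===== PRECONDITION & SPEC =====
-- Pre_ excludes exactly the inputs on which A (and B) raise ValueError: empty cover or empty secret.
def Pre_encode_text_zero_width (cover : String) (secret : String) : Prop :=
  cover ≠ "" ∧ secret ≠ ""
instance (cover : String) (secret : String) : Decidable (Pre_encode_text_zero_width cover secret) := by
  unfold Pre_encode_text_zero_width; infer_instance

def pvWitness_encode_text_zero_width : String × String := ("hi", "A")

def Spec_encode_text_zero_width (cover : String) (secret : String) (out : String) : Prop := out = encode_text_zero_width_alt cover secret
instance (cover : String) (secret : String) (out : String) : Decidable (Spec_encode_text_zero_width cover secret out) := by unfold Spec_encode_text_zero_width; infer_instance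

-- ===== CLAIM (what is proved, stated in full; the proofs are below) =====
def Claim_equal_encode_text_zero_width : Prop := ∀ (cover : String) (secret : String), Dom_encode_text_zero_width cover secret → Pre_encode_text_zero_width cover secret → Spec_encode_text_zero_width cover secret (encode_text_zero_width cover secret)

-- ===== LEMMAS AND PROOFS =====

-- the back-to-front divmod recursion produces MSB-first exactly the bits of f"{n:08b}"
theorem zwByteRec_eq (n : Nat) :
    zwByteRec 8 n [zwSep] = (bits8 n).map (fun b => if b = '1' then zwOne else zwZero) ++ [zwSep] := by
  simp [zwByteRec, bits8, Nat.div_div_eq_div_mul]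

-- table lookup = the per-byte recursion, for any byte value < 256
theorem zwByteTable_getD (n : Nat) (hn : n < 256) :
    (zwByteTable.getD n "").toList = zwByteRec 8 n [zwSep] := by
  simp [zwByteTable, List.getD, hn]

-- one byte of A's flat loop, started at a multiple of 8, consumes its 8 bits and the separator
theorem aPayloadLoop_byte (n : Nat) (rest : List Char) (i : Nat) (acc : List Char)
    (hi : i % 8 = 0) :
    aPayloadLoop (bits8 n ++ rest) i acc =
      aPayloadLoop rest (i + 8)
        (acc ++ ((bits8 n).map (fun b => if b = '1' then zwOne else zwZero) ++ [zwSep])) := by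
  have h1 : (i + 1) % 8 ≠ 0 := by omega
  have h2 : (i + 2) % 8 ≠ 0 := by omega
  have h3 : (i + 3) % 8 ≠ 0 := by omega
  have h4 : (i + 4) % 8 ≠ 0 := by omega
  have h5 : (i + 5) % 8 ≠ 0 := by omega
  have h6 : (i + 6) % 8 ≠ 0 := by omega
  have h7 : (i + 7) % 8 ≠ 0 := by omega
  have h8 : (i + 7 + 1) % 8 = 0 := by omega
  simp [bits8, aPayloadLoop, h1, h2, h3, h4, h5, h6, h7, h8]

-- A's flat enumerate loop over the concatenated bit string equals B's table-lookup payload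
theorem aPayloadLoop_flatMap (cs : List Char) (h : ∀ c ∈ cs, c.toNat < 256)
    (i : Nat) (acc : List Char) (hi : i % 8 = 0) :
    aPayloadLoop (cs.flatMap (fun c => bits8 c.toNat)) i acc =
      acc ++ cs.flatMap (fun c => (zwByteTable.getD c.toNat "").toList) := by
  induction cs generalizing i acc with
  | nil => simp [aPayloadLoop]
  | cons c cs ih =>
      rw [List.flatMap_cons, aPayloadLoop_byte _ _ _ _ hi,
        ih (fun d hd => h d (List.mem_cons_of_mem _ hd)) (i + 8) _ (by omega),
        List.flatMap_cons, zwByteTable_getD _ (h c (List.mem_cons_self ..)),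
        zwByteRec_eq]
      simp

-- ===== VERDICT (by name: the statement is the Claim_ definition above) =====
theorem encode_text_zero_width_spec : Claim_equal_encode_text_zero_width := by
  intro cover secret hdom _
  have hsec : ∀ c ∈ secret.toList, c.toNat < 256 := by
    have : pvDomStr secret = true := by
      unfold Dom_encode_text_zero_width at hdom
      exact (Bool.and_eq_true ..).mp hdom |>.2
    intro c hc
    have := (List.all_eq_true.mp this) c hc
    simp [pvDomChar] at this
    omega
  simp only [Spec_encode_text_zero_width, encode_text_zero_width, encode_text_zero_width_alt,
    textToBits, aPayloadLoop_flatMap _ hsec 0 _ (by omega)]
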